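-- pv_equiv track=rewrite | github.com/AdamZhouSE/pythonHomework | Code/CodeRecords/2714/60717/309273.py | isPartOf
-- ===== SOURCE A (Python) =====
-- def isPartOf(str1,str2):
--     str1=list(str1)
--     str2=list(str2)
--     str3=str1.copy()
--     str4=str2.copy()
--     for i in str3:
--         if i in str2:
--             str1.remove(i)
--             str2.remove(i)
--             str4.remove(i)
--     for i in str4:
--         if i in str1:
--             str1.remove(i)
--             str2.remove(i)
--     if str1==[] or str2==[]:
--         return True
--     else:
--         return False
-- ===== SOURCE B (Python) =====
-- def isPartOf(str1, str2):
--     a = sorted(str1)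
--     b = sorted(str2)
--     i = j = 0
--     extra1 = extra2 = False
--     while i < len(a) and j < len(b):
--         if a[i] == b[j]:
--             i += 1
--             j += 1
--         elif a[i] < b[j]:
--             extra1 = True
--             i += 1
--         else:
--             extra2 = True
--             j += 1
--     if i < len(a):
--         extra1 = True
--     if j < len(b):
--         extra2 = True
--     return (not extra1) or (not extra2)
-- ===== Notes on version B (the rewrite author's own statement) =====
-- stated objective: faster
-- what changed: Replaces A's repeated list.remove/membership loops (quadratic multiset cancellation in two passes) by sorting both strings once and a single two-pointer merge scan that flags surplus characters on either side.
import Mathlib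
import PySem

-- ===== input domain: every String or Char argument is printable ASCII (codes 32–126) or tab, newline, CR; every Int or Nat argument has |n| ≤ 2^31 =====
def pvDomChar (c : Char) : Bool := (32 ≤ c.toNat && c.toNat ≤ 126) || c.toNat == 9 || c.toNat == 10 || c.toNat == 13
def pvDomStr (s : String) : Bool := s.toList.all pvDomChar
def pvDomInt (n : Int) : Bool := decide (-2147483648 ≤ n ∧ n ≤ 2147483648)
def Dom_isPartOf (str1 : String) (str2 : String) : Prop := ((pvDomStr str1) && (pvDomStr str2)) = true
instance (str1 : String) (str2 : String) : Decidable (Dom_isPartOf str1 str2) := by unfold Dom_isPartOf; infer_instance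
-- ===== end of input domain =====

-- B sorts both strings once and does a two-pointer merge scan instead of A's
-- quadratic remove-loops; asymptotically faster, same return value everywhere.

-- ===== PORT A =====
-- list.remove(i): Python raises ValueError when i is absent; in A every call is
-- guarded (i was just found in the list), so the 'none' branch is unreachable.
def pyRemove (xs : List Char) (v : Char) : List Char :=
  match PySem.List.remove? xs v with
  | some ys => ys
  | none => xs

-- first loop: for i in str3: if i in str2: remove i from str1, str2, str4
def loopA1 : List Char → List Char → List Char → List Char → List Char × List Char × List Char
  | [], a, b, d => (a, b, d)
  | i :: rest, a, b, d =>
    if i ∈ b then loopA1 rest (pyRemove a i) (pyRemove b i) (pyRemove d i)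
    else loopA1 rest a b d

-- second loop: for i in str4: if i in str1: remove i from str1, str2
def loopA2 : List Char → List Char → List Char → List Char × List Char
  | [], a, b => (a, b)
  | i :: rest, a, b =>
    if i ∈ a then loopA2 rest (pyRemove a i) (pyRemove b i)
    else loopA2 rest a b

def isPartOf (str1 : String) (str2 : String) : Bool :=
  let l1 := str1.toList
  let l2 := str2.toList
  let s := loopA1 l1 l1 l2 l2
  let t := loopA2 s.2.2 s.1 s.2.1
  decide (t.1 = [] ∨ t.2 = [])

-- ===== PORT B =====
-- two-pointer merge over the sorted lists, flagging surplus chars on each side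
def mergeScan : List Char → List Char → Bool → Bool → Bool
  | x :: xs, y :: ys, e1, e2 =>
    if x = y then mergeScan xs ys e1 e2
    else if x < y then mergeScan xs (y :: ys) true e2
    else mergeScan (x :: xs) ys e1 true
  | xs, ys, e1, e2 =>
    !(e1 || !xs.isEmpty) || !(e2 || !ys.isEmpty)
termination_by a b _ _ => a.length + b.length

def isPartOf_alt (str1 : String) (str2 : String) : Bool :=
  mergeScan (PySem.List.sorted str1.toList (fun x => x) false)
            (PySem.List.sorted str2.toList (fun x => x) false) false false

-- ===== PRECONDITION & SPEC =====
def Spec_isPartOf (str1 : String) (str2 : String) (out : Bool) : Prop := out = isPartOf_alt str1 str2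
instance (str1 : String) (str2 : String) (out : Bool) : Decidable (Spec_isPartOf str1 str2 out) := by unfold Spec_isPartOf; infer_instance

-- ===== CLAIM (what is proved, stated in full; the proofs are below) =====
def Claim_equal_isPartOf : Prop := ∀ (str1 : String) (str2 : String), Dom_isPartOf str1 str2 → Spec_isPartOf str1 str2 (isPartOf str1 str2)

-- ===== LEMMAS AND PROOFS =====

-- "char multiset of a is contained in that of b"
def Subm (a b : List Char) : Prop := ∀ c : Char, a.count c ≤ b.count c

lemma pyRemove_of_mem {xs : List Char} {v : Char} (h : v ∈ xs) :
    pyRemove xs v = xs.erase v := by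
  simp [pyRemove, PySem.List.remove?_eq_some_erase xs v h]

lemma count_pyRemove_self {xs : List Char} {v : Char} (h : v ∈ xs) :
    (pyRemove xs v).count v = xs.count v - 1 := by
  rw [pyRemove_of_mem h]; simp [List.count_erase_self]

lemma count_pyRemove_ne {xs : List Char} {v c : Char} (h : v ∈ xs) (hne : c ≠ v) :
    (pyRemove xs v).count c = xs.count c := by
  rw [pyRemove_of_mem h]; simp [List.count_erase_of_ne hne]

lemma loopA1_spec : ∀ (l a b : List Char), (∀ c, l.count c ≤ a.count c) →
    (loopA1 l a b b).2.2 = (loopA1 l a b b).2.1 ∧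
    (∀ c, (loopA1 l a b b).1.count c = a.count c - min (l.count c) (b.count c) ∧
          (loopA1 l a b b).2.1.count c = b.count c - min (l.count c) (b.count c)) := by
  intro l
  induction l with
  | nil => intro a b _; exact ⟨rfl, fun c => by simp [loopA1]⟩
  | cons i rest ih =>
    intro a b h
    by_cases hib : i ∈ b
    · have hia : i ∈ a := by
        have := h i
        rw [List.count_cons_self] at this
        exact List.count_pos_iff.mp (by omega)
      have hbpos : 1 ≤ b.count i := List.count_pos_iff.mpr hib
      have hrec := ih (pyRemove a i) (pyRemove b i) (fun c => by
        have hc := h c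
        rcases eq_or_ne c i with rfl | hne
        · rw [List.count_cons_self] at hc
          rw [count_pyRemove_self hia]; omega
        · rw [List.count_cons_of_ne (Ne.symm hne)] at hc
          rw [count_pyRemove_ne hia hne]; omega)
      refine ⟨?_, fun c => ?_⟩
      · simpa [loopA1, hib] using hrec.1
      · have h1 := (hrec.2 c).1
        have h2 := (hrec.2 c).2
        simp only [loopA1, if_pos hib]
        rw [h1, h2]
        rcases eq_or_ne c i with rfl | hne
        · rw [count_pyRemove_self hia, count_pyRemove_self hib,
              List.count_cons_self]
          constructor <;> omega
        · rw [count_pyRemove_ne hia hne, count_pyRemove_ne hib hne,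
              List.count_cons_of_ne (Ne.symm hne)]
          exact ⟨rfl, rfl⟩
    · have hb0 : b.count i = 0 := List.count_eq_zero.mpr hib
      have hrec := ih a b (fun c => by
        have hc := h c
        rcases eq_or_ne c i with rfl | hne
        · rw [List.count_cons_self] at hc; omega
        · rwa [List.count_cons_of_ne (Ne.symm hne)] at hc)
      refine ⟨by simpa [loopA1, hib] using hrec.1, fun c => ?_⟩
      have h1 := (hrec.2 c).1
      have h2 := (hrec.2 c).2
      simp only [loopA1, if_neg hib]
      rw [h1, h2]
      rcases eq_or_ne c i with rfl | hne
      · rw [List.count_cons_self]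
        constructor <;> omega
      · rw [List.count_cons_of_ne (Ne.symm hne)]
        exact ⟨rfl, rfl⟩

lemma loopA2_noop : ∀ (l a b : List Char), (∀ i ∈ l, i ∉ a) → loopA2 l a b = (a, b) := by
  intro l
  induction l with
  | nil => intro a b _; rfl
  | cons i rest ih =>
    intro a b h
    have : i ∉ a := h i (List.mem_cons_self)
    simp [loopA2, this, ih a b (fun j hj => h j (List.mem_cons_of_mem _ hj))]

lemma eq_nil_iff_count (l : List Char) : l = [] ↔ ∀ c : Char, l.count c = 0 := by
  constructor
  · rintro rfl c; simp
  · intro h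
    cases l with
    | nil => rfl
    | cons x xs => have := h x; rw [List.count_cons_self] at this; omega

lemma isPartOf_iff (str1 str2 : String) :
    isPartOf str1 str2 = true ↔ (Subm str1.toList str2.toList ∨ Subm str2.toList str1.toList) := by
  obtain ⟨heq, hcount⟩ := loopA1_spec str1.toList str1.toList str2.toList (fun c => le_refl _)
  have hdis : ∀ i ∈ (loopA1 str1.toList str1.toList str2.toList str2.toList).2.2,
      i ∉ (loopA1 str1.toList str1.toList str2.toList str2.toList).1 := by
    intro i hi hmem
    rw [heq] at hi
    have h1 := (hcount i).1
    have h2 := (hcount i).2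
    have hp1 : 0 < (loopA1 str1.toList str1.toList str2.toList str2.toList).2.1.count i :=
      List.count_pos_iff.mpr hi
    have hp2 : 0 < (loopA1 str1.toList str1.toList str2.toList str2.toList).1.count i :=
      List.count_pos_iff.mpr hmem
    omega
  have hrun : isPartOf str1 str2 =
      decide ((loopA1 str1.toList str1.toList str2.toList str2.toList).1 = [] ∨
              (loopA1 str1.toList str1.toList str2.toList str2.toList).2.1 = []) := by
    simp only [isPartOf]
    rw [loopA2_noop _ _ _ hdis]
  rw [hrun, decide_eq_true_iff]
  have e1 : (loopA1 str1.toList str1.toList str2.toList str2.toList).1 = [] ↔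
      Subm str1.toList str2.toList := by
    rw [eq_nil_iff_count]
    constructor
    · intro h c; have h1 := (hcount c).1; have h2 := h c; omega
    · intro h c; have h1 := (hcount c).1; have h2 := h c; omega
  have e2 : (loopA1 str1.toList str1.toList str2.toList str2.toList).2.1 = [] ↔
      Subm str2.toList str1.toList := by
    rw [eq_nil_iff_count]
    constructor
    · intro h c; have h1 := (hcount c).2; have h2 := h c; omega
    · intro h c; have h1 := (hcount c).2; have h2 := h c; omega
  rw [e1, e2]

lemma subm_nil (b : List Char) : Subm [] b := fun c => by simp

lemma not_subm_cons_nil (y : Char) (ys : List Char) : ¬ Subm (y :: ys) [] := by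
  intro h; have := h y; rw [List.count_cons_self] at this; simp at this

lemma subm_cons_cons (x : Char) (xs ys : List Char) :
    Subm (x :: xs) (x :: ys) ↔ Subm xs ys := by
  constructor <;> intro h c <;> have hc := h c
  · rcases eq_or_ne c x with rfl | hne
    · rw [List.count_cons_self, List.count_cons_self] at hc; omega
    · rwa [List.count_cons_of_ne (Ne.symm hne), List.count_cons_of_ne (Ne.symm hne)] at hc
  · rcases eq_or_ne c x with rfl | hne
    · rw [List.count_cons_self, List.count_cons_self]; omega
    · rwa [List.count_cons_of_ne (Ne.symm hne), List.count_cons_of_ne (Ne.symm hne)]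

lemma count_eq_zero_of_head_lt {x : Char} {b : List Char} (hall : ∀ z ∈ b, x < z) :
    b.count x = 0 :=
  List.count_eq_zero.mpr (fun hmem => lt_irrefl x (hall x hmem))

lemma not_subm_head_lt {x : Char} {xs b : List Char} (hall : ∀ z ∈ b, x < z) :
    ¬ Subm (x :: xs) b := by
  intro h
  have := h x
  rw [List.count_cons_self, count_eq_zero_of_head_lt hall] at this
  omega

lemma subm_head_lt {x : Char} {xs b : List Char} (hall : ∀ z ∈ b, x < z) :
    Subm b (x :: xs) ↔ Subm b xs := by
  constructor <;> intro h c <;> have hc := h c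
  · rcases eq_or_ne c x with rfl | hne
    · rw [count_eq_zero_of_head_lt hall]; omega
    · rwa [List.count_cons_of_ne (Ne.symm hne)] at hc
  · rcases eq_or_ne c x with rfl | hne
    · rw [count_eq_zero_of_head_lt hall]; omega
    · rwa [List.count_cons_of_ne (Ne.symm hne)]

lemma mergeScan_spec : ∀ (a : List Char), a.Pairwise (· ≤ ·) → ∀ (b : List Char),
    b.Pairwise (· ≤ ·) → ∀ e1 e2, (mergeScan a b e1 e2 = true ↔
      ((e1 = false ∧ Subm a b) ∨ (e2 = false ∧ Subm b a))) := by
  intro a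
  induction a with
  | nil =>
    intro _ b _ e1 e2
    cases b with
    | nil =>
      simp only [mergeScan]
      cases e1 <;> cases e2 <;> simp [subm_nil]
    | cons y ys =>
      simp only [mergeScan]
      cases e1 <;> cases e2 <;> simp [subm_nil, not_subm_cons_nil]
  | cons x xs ih =>
    intro hpa b
    induction b with
    | nil =>
      intro _ e1 e2
      simp only [mergeScan]
      cases e1 <;> cases e2 <;> simp [subm_nil, not_subm_cons_nil]
    | cons y ys ihb =>
      intro hpb e1 e2
      have hpa' : xs.Pairwise (· ≤ ·) := (List.pairwise_cons.mp hpa).2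
      have hxle : ∀ z ∈ xs, x ≤ z := (List.pairwise_cons.mp hpa).1
      have hpb' : ys.Pairwise (· ≤ ·) := (List.pairwise_cons.mp hpb).2
      have hyle : ∀ z ∈ ys, y ≤ z := (List.pairwise_cons.mp hpb).1
      by_cases hxy : x = y
      · subst hxy
        simp only [mergeScan, reduceIte]
        rw [ih hpa' ys hpb' e1 e2, subm_cons_cons, subm_cons_cons]
      · by_cases hlt : x < y
        · have hall : ∀ z ∈ y :: ys, x < z := by
            intro z hz
            rcases List.mem_cons.mp hz with rfl | hz
            · exact hlt
            · exact lt_of_lt_of_le hlt (hyle z hz)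
          simp only [mergeScan, if_neg hxy, if_pos hlt]
          rw [ih hpa' (y :: ys) hpb true e2]
          have hrej := not_subm_head_lt (xs := xs) hall
          have hsw := subm_head_lt (xs := xs) hall
          simp only [Bool.true_eq_false, false_and, false_or]
          rw [hsw]
          tauto
        · have hgt : y < x := lt_of_le_of_ne (not_lt.mp hlt) (Ne.symm hxy)
          have hall : ∀ z ∈ x :: xs, y < z := by
            intro z hz
            rcases List.mem_cons.mp hz with rfl | hz
            · exact hgt
            · exact lt_of_lt_of_le hgt (hxle z hz)
          simp only [mergeScan, if_neg hxy, if_neg hlt]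
          rw [ihb hpb' e1 true]
          have hrej := not_subm_head_lt (xs := ys) hall
          have hsw := subm_head_lt (xs := ys) hall
          simp only [Bool.true_eq_false, false_and, or_false]
          rw [hsw]
          tauto

lemma subm_perm {a a' b b' : List Char} (ha : a.Perm a') (hb : b.Perm b') :
    Subm a b ↔ Subm a' b' := by
  unfold Subm
  constructor <;> intro h c <;> have := h c
  · rwa [ha.count_eq, hb.count_eq] at this
  · rwa [← ha.count_eq, ← hb.count_eq] at this

lemma isPartOf_alt_iff (str1 str2 : String) :
    isPartOf_alt str1 str2 = true ↔ (Subm str1.toList str2.toList ∨ Subm str2.toList str1.toList) := by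
  unfold isPartOf_alt
  have p1 := PySem.List.sorted_perm (xs := str1.toList) (key := fun x => x) (rev := false)
  have p2 := PySem.List.sorted_perm (xs := str2.toList) (key := fun x => x) (rev := false)
  have s1 : (PySem.List.sorted str1.toList (fun x => x) false).Pairwise (· ≤ ·) :=
    PySem.List.sorted_pairwise (xs := str1.toList) (key := fun x => x)
  have s2 : (PySem.List.sorted str2.toList (fun x => x) false).Pairwise (· ≤ ·) :=
    PySem.List.sorted_pairwise (xs := str2.toList) (key := fun x => x)
  rw [mergeScan_spec _ s1 _ s2 false false]
  rw [subm_perm p1 p2, subm_perm p2 p1]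
  simp

-- ===== VERDICT (by name: the statement is the Claim_ definition above) =====
theorem isPartOf_spec : Claim_equal_isPartOf := by
  intro str1 str2 _
  unfold Spec_isPartOf
  rw [Bool.eq_iff_iff, isPartOf_iff, isPartOf_alt_iff]
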